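-- pv_equiv track=rewrite | github.com/KhangMingg/Project | thi_thu_2025/tim_uoc_eg.py | is_special
-- ===== SOURCE A (Python) =====
-- def is_special(n):
--     """
--     Kiểm tra xem số n (n >= 2) có phải là số đặc biệt hay không.
--     Số đặc biệt có ít nhất một cặp ước liên tiếp (u, u+1).
--     """
--     # Số nhỏ hơn 2 không thể có 2 ước dương liên tiếp
--     if n < 2:
--         return False
--
--     # Duyệt các khả năng cho ước nhỏ hơn trong cặp (u)
--     # Không cần duyệt hết đến n, vì nếu u và u+1 là ước thì u phải nhỏ hơn n
--     # Dừng sớm hơn cũng được, ví dụ đến n//2 + 1, nhưng đến n cũng không sai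
--     for u in range(1, n):
--         # Kiểm tra xem u có phải là ước không
--         if n % u == 0:
--             # Nếu u là ước, kiểm tra xem u+1 có là ước không
--             if (u + 1) <= n and n % (u + 1) == 0:
--                 # Tìm thấy cặp ước liên tiếp u và u+1
--                 return True
--         # Nếu u > n // 2 thì u + 1 cũng sẽ > n // 2, khả năng tìm được ước giảm
--         # nhưng cứ để vòng lặp chạy đến n-1 cho chắc chắn và đơn giản
--         # Ví dụ: n=6, u=2 -> 6%2==0, 6%(2+1)==6%3==0 -> True
--
--     # Không tìm thấy cặp ước liên tiếp nào
--     return False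
-- ===== SOURCE B (Python) =====
-- def is_special(n):
--     # Consecutive divisors u, u+1 mean one of them is even, so n must be even;
--     # conversely for even n >= 2 the pair (1, 2) works. O(1) instead of A's O(n) scan.
--     return n >= 2 and n % 2 == 0
-- ===== Notes on version B (the rewrite author's own statement) =====
-- stated objective: faster
-- what changed: Replaced A's linear divisor scan by a closed-form parity test: any pair of consecutive divisors contains an even divisor, forcing n even, and every even n at least two has the smallest such pair of divisors.
import Mathlib
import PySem

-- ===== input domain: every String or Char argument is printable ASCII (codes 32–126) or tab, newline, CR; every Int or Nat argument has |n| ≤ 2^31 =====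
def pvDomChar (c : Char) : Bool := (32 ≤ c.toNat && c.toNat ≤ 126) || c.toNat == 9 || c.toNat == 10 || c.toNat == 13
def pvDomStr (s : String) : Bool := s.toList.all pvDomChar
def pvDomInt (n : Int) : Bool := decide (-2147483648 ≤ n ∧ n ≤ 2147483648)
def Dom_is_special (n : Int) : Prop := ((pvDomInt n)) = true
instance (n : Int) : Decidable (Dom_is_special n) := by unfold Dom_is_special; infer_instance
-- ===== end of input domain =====

-- B replaces A's O(n) divisor scan by the O(1) test "n >= 2 and n even".


-- ===== PORT A =====
-- the `for u in range(1, n)` loop with its early `return True`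
def isSpecialLoop (n : Int) : List Int → Bool
  | [] => false
  | u :: rest =>
    if PySem.Int.mod n u == 0 && (u + 1 ≤ n && PySem.Int.mod n (u + 1) == 0) then
      true
    else
      isSpecialLoop n rest

def is_special (n : Int) : Bool :=
  if n < 2 then false
  else isSpecialLoop n (PySem.List.pyRange 1 n 1)

-- ===== PORT B =====
def is_special_alt (n : Int) : Bool :=
  decide (n ≥ 2) && (PySem.Int.mod n 2 == 0)

-- ===== PRECONDITION & SPEC =====
def Spec_is_special (n : Int) (out : Bool) : Prop := out = is_special_alt n
instance (n : Int) (out : Bool) : Decidable (Spec_is_special n out) := by unfold Spec_is_special; infer_instance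

-- ===== CLAIM (what is proved, stated in full; the proofs are below) =====
def Claim_equal_is_special : Prop := ∀ (n : Int), Dom_is_special n → Spec_is_special n (is_special n)

-- ===== LEMMAS AND PROOFS =====

-- If n is odd, no pair of consecutive divisors exists, so the loop returns false on any list.
theorem isSpecialLoop_of_odd (n : Int) (hodd : PySem.Int.mod n 2 ≠ 0) :
    ∀ l : List Int, isSpecialLoop n l = false := by
  intro l
  induction l with
  | nil => rfl
  | cons u rest ih =>
    simp only [isSpecialLoop]
    rw [if_neg, ih]
    intro hc
    simp only [Bool.and_eq_true, beq_iff_eq, decide_eq_true_eq, PySem.Int.mod] at hc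
    obtain ⟨h1, _, h3⟩ := hc
    -- u ∣ n and (u+1) ∣ n; one of u, u+1 is even, hence 2 ∣ n
    have hu : u ∣ n := Int.dvd_of_fmod_eq_zero h1
    have hu1 : (u + 1) ∣ n := Int.dvd_of_fmod_eq_zero h3
    have h2n : (2 : Int) ∣ n := by
      rcases Int.even_or_odd u with he | ho
      · exact dvd_trans he.two_dvd hu
      · have : Even (u + 1) := Int.even_add_one.mpr (Int.not_even_iff_odd.mpr ho)
        exact dvd_trans this.two_dvd hu1
    exact hodd (by simpa [PySem.Int.mod] using Int.fmod_eq_zero_of_dvd h2n)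

theorem is_special_eq (n : Int) : is_special n = is_special_alt n := by
  by_cases h2 : n < 2
  · simp [is_special, is_special_alt, h2, show ¬ n ≥ 2 by omega]
  · have hge : n ≥ 2 := by omega
    have hrange : PySem.List.pyRange 1 n 1 = 1 :: PySem.List.pyRange 2 n 1 :=
      PySem.List.pyRange_one_cons (by omega)
    simp only [is_special, if_neg h2, hrange, isSpecialLoop]
    by_cases he : PySem.Int.mod n 2 = 0
    · rw [if_pos]
      · have h2n : (2:Int) ∣ n := Int.dvd_of_fmod_eq_zero (by simpa [PySem.Int.mod] using he)
        simp [is_special_alt, hge, h2n]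
      · simp only [Bool.and_eq_true, beq_iff_eq, decide_eq_true_eq, PySem.Int.mod]
        refine ⟨Int.fmod_eq_zero_of_dvd (one_dvd n), by omega, ?_⟩
        simpa [PySem.Int.mod] using he
    · rw [if_neg, isSpecialLoop_of_odd n he]
      · have h' : n % 2 ≠ 0 := by
          simpa [PySem.Int.mod, Int.fmod_eq_emod] using he
        simp only [is_special_alt, PySem.Int.mod]
        have : n.fmod 2 ≠ 0 := by simpa [Int.fmod_eq_emod] using h'
        simp [this]
      · simp only [Bool.and_eq_true, beq_iff_eq, decide_eq_true_eq, PySem.Int.mod]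
        rintro ⟨_, _, h3⟩
        exact he (by simpa [PySem.Int.mod] using h3)

-- ===== VERDICT (by name: the statement is the Claim_ definition above) =====
theorem is_special_spec : Claim_equal_is_special := by
  intro n _
  unfold Spec_is_special
  exact is_special_eq n
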